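-- pv_equiv track=rewrite | github.com/elenanikolova896/Python-Beginner-Projects | groups_per_user.py | groups_per_user
-- ===== SOURCE A (Python) =====
-- def groups_per_user(data):
--     result = {}
--     for group, users in data.items():
--         for user in users:
--             if user in result:
--                 result[user].append(group)
--             else:
--                 result[user] = [group]
--     return result
-- ===== SOURCE B (Python) =====
-- def groups_per_user(data):
--     pairs = [(user, group) for group, users in data.items() for user in users]
--     order = list(dict.fromkeys(user for user, _ in pairs))
--     return {u: [g for v, g in pairs if v == u] for u in order}
-- ===== Notes on version B (the rewrite author's own statement) =====
-- stated objective: alternative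
-- what changed: B flattens the mapping to a list of (user, group) pairs, dedups the users in first-occurrence order with dict.fromkeys, and builds each user's group list by a filtering comprehension over the pairs, instead of A's single pass mutating a dict of lists.
import Mathlib
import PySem

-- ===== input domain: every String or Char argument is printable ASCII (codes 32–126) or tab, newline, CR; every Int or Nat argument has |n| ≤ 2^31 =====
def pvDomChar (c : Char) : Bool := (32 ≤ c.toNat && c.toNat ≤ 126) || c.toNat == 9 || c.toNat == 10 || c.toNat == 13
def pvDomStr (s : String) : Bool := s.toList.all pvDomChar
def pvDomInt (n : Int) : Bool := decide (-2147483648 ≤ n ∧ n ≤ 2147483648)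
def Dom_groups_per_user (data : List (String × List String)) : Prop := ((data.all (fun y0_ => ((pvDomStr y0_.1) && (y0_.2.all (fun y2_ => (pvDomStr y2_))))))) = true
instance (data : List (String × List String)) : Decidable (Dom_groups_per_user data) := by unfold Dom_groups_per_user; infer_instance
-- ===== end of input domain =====

-- B inverts the group→users map by flattening to (user, group) pairs, deduping users in
-- first-occurrence order, and collecting each user's groups by filtering the pair list
-- (alternative decomposition; A is a single pass mutating a dict of lists).


-- ===== PORT A =====
def groups_per_user (data : List (String × List String)) : List (String × List String) :=
  (data.foldl (fun result gu =>
      gu.2.foldl (fun result user =>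
        match result.get? user with
        | some gs => result.insert user (gs ++ [gu.1])   -- user in result: result[user].append(group)
        | none => result.insert user [gu.1])             -- else: result[user] = [group]
      result)
    (PySem.Dict.empty : PySem.Dict String (List String))).items

-- ===== PORT B =====
def groups_per_user_alt (data : List (String × List String)) : List (String × List String) :=
  let pairs := data.flatMap (fun gu => gu.2.map (fun user => (user, gu.1)))
  let order := PySem.List.dedup (pairs.map Prod.fst)   -- list(dict.fromkeys(...))
  order.map (fun u => (u, (pairs.filter (fun p => p.1 == u)).map Prod.snd))

-- ===== PRECONDITION & SPEC =====
def Spec_groups_per_user (data : List (String × List String)) (out : List (String × List String)) : Prop := out = groups_per_user_alt data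
instance (data : List (String × List String)) (out : List (String × List String)) : Decidable (Spec_groups_per_user data out) := by unfold Spec_groups_per_user; infer_instance

-- ===== CLAIM (what is proved, stated in full; the proofs are below) =====
def Claim_equal_groups_per_user : Prop := ∀ (data : List (String × List String)), Dom_groups_per_user data → Spec_groups_per_user data (groups_per_user data)

-- ===== LEMMAS AND PROOFS =====

-- A's branch on membership is exactly dict modify with default [].
theorem gpu_step_eq_modify (d : PySem.Dict String (List String)) (u g : String) :
    (match d.get? u with
     | some gs => d.insert u (gs ++ [g])
     | none => d.insert u [g]) = d.modify u [] (· ++ [g]) := by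
  rcases h : d.get? u with _ | gs <;>
    simp [PySem.Dict.modify, PySem.Dict.getD_of_get?_eq_none, PySem.Dict.getD_of_get?_eq_some, h]

-- A's nested loop over data is the modify-fold over the flattened (user, group) pairs.
theorem gpu_fold_flatten (data : List (String × List String))
    (d : PySem.Dict String (List String)) :
    data.foldl (fun result gu =>
      gu.2.foldl (fun result user => result.modify user [] (· ++ [gu.1])) result) d
    = (data.flatMap (fun gu => gu.2.map (fun user => (user, gu.1)))).foldl
        (fun d p => d.modify p.1 [] (· ++ [p.2])) d := by
  induction data generalizing d with
  | nil => rfl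
  | cons gu rest ih =>
    simp only [List.foldl_cons, List.flatMap_cons, List.foldl_append, List.foldl_map]
    exact ih _

theorem groups_per_user_spec' (data : List (String × List String)) :
    groups_per_user data = groups_per_user_alt data := by
  unfold groups_per_user groups_per_user_alt
  simp only [gpu_step_eq_modify]
  rw [gpu_fold_flatten]
  set pairs := data.flatMap (fun gu => gu.2.map (fun user => (user, gu.1))) with hp
  have hnd : (pairs.foldl (fun d p => d.modify p.1 [] (· ++ [p.2]))
      (PySem.Dict.empty : PySem.Dict String (List String))).keys.Nodup := by
    exact PySem.Dict.nodup_keys_foldl_modify_key pairs Prod.fst []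
      (fun d p => (· ++ [p.2])) _ PySem.Dict.nodup_keys_empty
  rw [PySem.Dict.items_eq_map_keys _ hnd []]
  have hkeys : (pairs.foldl (fun d p => d.modify p.1 [] (· ++ [p.2]))
      (PySem.Dict.empty : PySem.Dict String (List String))).keys
      = PySem.Set.ofList (pairs.map Prod.fst) := by
    rw [PySem.Dict.keys_foldl_modify_key]
    simp [PySem.Set.update_nil_left]
  rw [hkeys]
  simp only [PySem.List.dedup_eq_ofList]
  refine List.map_congr_left (fun u _ => ?_)
  rw [PySem.Dict.getD_foldl_modify_append]
  simp [PySem.Dict.getD_empty]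

-- ===== VERDICT (by name: the statement is the Claim_ definition above) =====
theorem groups_per_user_spec : Claim_equal_groups_per_user := by
  intro data _
  exact groups_per_user_spec' data
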